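-- pv_equiv track=rewrite | github.com/jinlibao/toolkits | Project.Euler/Answers.Python/30.py | genBOUND
-- ===== SOURCE A (Python) =====
-- def recurringNumber(numberOfDigits):
-- 	rNumber = 0
-- 	for i in range(numberOfDigits):
-- 		rNumber += 10 ** i
-- 	return rNumber
--
-- def genBOUND(numberOfPower):
-- 	numberOfDigits = 2
-- 	a = (9 ** (numberOfPower)) * numberOfDigits
-- 	b = recurringNumber(numberOfDigits) * 9
-- 	while a > b:
-- 		a = (9 ** (numberOfPower)) * numberOfDigits
-- 		b = recurringNumber(numberOfDigits) * 9
-- 		numberOfDigits += 1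
-- 	return a
-- ===== SOURCE B (Python) =====
-- def genBOUND(numberOfPower):
--     d = 2
--     while 9 ** numberOfPower * d > 10 ** d - 1:
--         d += 1
--     return 9 ** numberOfPower * d
-- ===== Notes on version B (the rewrite author's own statement) =====
-- stated objective: faster
-- what changed: B drops the recurringNumber helper and its inner repunit-summation loop, testing the closed-form inequality 9**p*d > 10**d-1 in one while loop over d, removing a quadratic pass and the duplicated a/b assignments.
-- outside the precondition, e.g. on genBOUND(-1): A returns 0.2222222222222222, B returns 0.2222222222222222
import Mathlib
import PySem

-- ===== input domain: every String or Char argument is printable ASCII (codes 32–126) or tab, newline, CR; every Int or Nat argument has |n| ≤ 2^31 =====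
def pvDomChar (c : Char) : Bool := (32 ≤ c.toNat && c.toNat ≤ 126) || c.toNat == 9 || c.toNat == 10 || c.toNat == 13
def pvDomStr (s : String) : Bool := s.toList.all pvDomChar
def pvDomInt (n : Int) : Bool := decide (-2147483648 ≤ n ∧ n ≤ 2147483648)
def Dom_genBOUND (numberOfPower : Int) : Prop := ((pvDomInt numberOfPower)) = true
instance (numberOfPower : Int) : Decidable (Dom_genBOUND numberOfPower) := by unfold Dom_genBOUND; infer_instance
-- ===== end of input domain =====

-- ===== PORT A =====
-- B replaces the repunit helper and inner sum loop by the closed form 10^d-1 in one loop (objective: simpler).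
-- Pre_ restricts to numberOfPower >= 0: for negative p Python's 9**p is a float, so A returns a non-Int value.
-- The Nat fuel arguments are totality guards only.
def pvRecNum (numberOfDigits : Int) : Int :=
  (PySem.List.pyRange 0 numberOfDigits 1).foldl (fun r i => r + 10 ^ i.toNat) 0

def pvLoopA (p d a b : Int) : Nat → Int
  | 0 => a
  | f+1 => if a > b then pvLoopA p (d+1) (9 ^ p.toNat * d) (pvRecNum d * 9) f else a

def genBOUND (numberOfPower : Int) : Int :=
  pvLoopA numberOfPower 2 (9 ^ numberOfPower.toNat * 2) (pvRecNum 2 * 9)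
    (2 * numberOfPower.toNat + 5)

-- ===== PORT B =====
def pvLoopB (p d : Int) : Nat → Int
  | 0 => 9 ^ p.toNat * d
  | f+1 => if 9 ^ p.toNat * d > 10 ^ d.toNat - 1 then pvLoopB p (d+1) f else 9 ^ p.toNat * d

def genBOUND_alt (numberOfPower : Int) : Int :=
  pvLoopB numberOfPower 2 (2 * numberOfPower.toNat + 4)

-- ===== PRECONDITION & SPEC =====
-- Pre_ excludes negative exponents, on which Python's 9**numberOfPower is a float and A returns a non-integer value.
def Pre_genBOUND (numberOfPower : Int) : Prop := 0 ≤ numberOfPower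
instance (numberOfPower : Int) : Decidable (Pre_genBOUND numberOfPower) := by unfold Pre_genBOUND; infer_instance
def pvWitness_genBOUND : Int := (5)
def Spec_genBOUND (numberOfPower : Int) (out : Int) : Prop := out = genBOUND_alt numberOfPower
instance (numberOfPower : Int) (out : Int) : Decidable (Spec_genBOUND numberOfPower out) := by unfold Spec_genBOUND; infer_instance

-- ===== CLAIM (what is proved, stated in full; the proofs are below) =====
def Claim_equal_genBOUND : Prop := ∀ (numberOfPower : Int), Dom_genBOUND numberOfPower → Pre_genBOUND numberOfPower → Spec_genBOUND numberOfPower (genBOUND numberOfPower)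

-- ===== LEMMAS AND PROOFS =====

-- The repunit helper times 9 is the closed form 10^d - 1 (for d ≥ 0).
theorem pvRecNum_mul_nine (d : Int) (hd : 0 ≤ d) : pvRecNum d * 9 = 10 ^ d.toNat - 1 := by
  unfold pvRecNum
  rw [show d = (d.toNat : Int) from (Int.toNat_of_nonneg hd).symm]
  rw [Int.toNat_natCast]
  induction d.toNat with
  | zero => simp
  | succ n ih =>
    rw [show ((n+1 : Nat) : Int) = (n : Int) + 1 by push_cast; ring]
    rw [PySem.List.pyRange_one_succ_right (by positivity)]
    rw [List.foldl_append]
    simp only [List.foldl]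
    have : ((n : Int)).toNat = n := Int.toNat_natCast n
    rw [add_mul, ih]
    rw [this]
    ring

-- One-step unfolding equations for the two loops (definitional).
theorem pvLoopA_zero (p d a b : Int) : pvLoopA p d a b 0 = a := rfl
theorem pvLoopA_succ (p d a b : Int) (f : Nat) :
    pvLoopA p d a b (f+1) =
      if a > b then pvLoopA p (d+1) (9 ^ p.toNat * d) (pvRecNum d * 9) f else a := rfl
theorem pvLoopB_zero (p d : Int) : pvLoopB p d 0 = 9 ^ p.toNat * d := rfl
theorem pvLoopB_succ (p d : Int) (f : Nat) :
    pvLoopB p d (f+1) =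
      if 9 ^ p.toNat * d > 10 ^ d.toNat - 1 then pvLoopB p (d+1) f else 9 ^ p.toNat * d := rfl

-- Core alignment: once A's loop carries the stale pair (a,b) computed for d (with the
-- loop condition true at d), it tracks B's loop at d+1 with one unit more fuel.
theorem pvLoop_align (p : Int) : ∀ (f : Nat) (d : Int), 0 ≤ d →
    9 ^ p.toNat * d > pvRecNum d * 9 →
    pvLoopA p (d+1) (9 ^ p.toNat * d) (pvRecNum d * 9) (f+1) = pvLoopB p (d+1) f := by
  intro f
  induction f with
  | zero =>
    intro d hd hc
    rw [pvLoopA_succ, if_pos hc, pvLoopA_zero, pvLoopB_zero]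
  | succ f ih =>
    intro d hd hc
    have hd1 : (0:Int) ≤ d + 1 := by omega
    rw [pvLoopA_succ, if_pos hc, pvLoopB_succ]
    by_cases hc1 : 9 ^ p.toNat * (d+1) > pvRecNum (d+1) * 9
    · rw [if_pos (by rw [← pvRecNum_mul_nine (d+1) hd1]; exact hc1)]
      exact ih (d+1) hd1 hc1
    · rw [if_neg (by rw [← pvRecNum_mul_nine (d+1) hd1]; exact hc1)]
      rw [pvLoopA_succ, if_neg hc1]

-- ===== VERDICT (by name: the statement is the Claim_ definition above) =====
theorem genBOUND_spec : Claim_equal_genBOUND := by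
  intro p _ _
  unfold Spec_genBOUND genBOUND genBOUND_alt
  set F := 2 * p.toNat + 4 with hF
  have h2 : (0:Int) ≤ 2 := by norm_num
  by_cases hc : 9 ^ p.toNat * 2 > pvRecNum 2 * 9
  · rw [show 2 * p.toNat + 5 = ((F - 1) + 1) + 1 by omega]
    rw [pvLoopA_succ, if_pos hc]
    rw [pvLoop_align p (F-1) 2 h2 hc]
    rw [show F = (F-1)+1 by omega, pvLoopB_succ]
    rw [if_pos (by rw [← pvRecNum_mul_nine 2 h2]; exact hc)]
    rfl
  · rw [show 2 * p.toNat + 5 = (2 * p.toNat + 4) + 1 by omega, pvLoopA_succ, if_neg hc]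
    rw [show F = (F-1)+1 by omega, pvLoopB_succ]
    rw [if_neg (by rw [← pvRecNum_mul_nine 2 h2]; exact hc)]
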